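-- pv_equiv track=rewrite | github.com/Rlahuerta/marker-mcp | marker_mcp/conversion_service.py | _tile_vertical_bounds
-- ===== SOURCE A (Python) =====
-- _DEFAULT_PAGE_TILE_OVERLAP_PX = 96
--
-- def _tile_vertical_bounds(
--     height: int,
--     max_tile_height: int,
--     overlap_px: int = _DEFAULT_PAGE_TILE_OVERLAP_PX,
-- ) -> list[tuple[int, int]]:
--     """Split an image height into overlapping vertical strips."""
--     if max_tile_height <= 0:
--         raise ValueError("max_page_height_px must be greater than zero.")
--     if overlap_px < 0:
--         raise ValueError("page tile overlap must be non-negative.")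
--     if overlap_px >= max_tile_height:
--         raise ValueError("page tile overlap must be smaller than max_page_height_px.")
--     if height <= 0:
--         return []
--     if height <= max_tile_height:
--         return [(0, height)]
--
--     bounds: list[tuple[int, int]] = []
--     top = 0
--     while top < height:
--         bottom = min(top + max_tile_height, height)
--         bounds.append((top, bottom))
--         if bottom >= height:
--             break
--         top = bottom - overlap_px
--     return bounds
-- ===== SOURCE B (Python) =====
-- _DEFAULT_PAGE_TILE_OVERLAP_PX = 96
--
-- def _tile_vertical_bounds(
--     height: int,
--     max_tile_height: int,
--     overlap_px: int = _DEFAULT_PAGE_TILE_OVERLAP_PX,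
-- ) -> list[tuple[int, int]]:
--     """Split an image height into overlapping vertical strips (closed-form tile count)."""
--     if max_tile_height <= 0:
--         raise ValueError("max_page_height_px must be greater than zero.")
--     if overlap_px < 0:
--         raise ValueError("page tile overlap must be non-negative.")
--     if overlap_px >= max_tile_height:
--         raise ValueError("page tile overlap must be smaller than max_page_height_px.")
--     if height <= 0:
--         return []
--     if height <= max_tile_height:
--         return [(0, height)]
--     stride = max_tile_height - overlap_px
--     n = (height - max_tile_height + stride - 1) // stride + 1
--     return [(i * stride, min(i * stride + max_tile_height, height)) for i in range(n)]
-- ===== Notes on version B (the rewrite author's own statement) =====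
-- stated objective: alternative
-- what changed: Replaces A's while-loop that walks tops until the bottom reaches height with a closed-form ceiling-division tile count n and a single range comprehension producing (i*stride, min(i*stride+max_tile_height, height)).
import Mathlib
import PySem

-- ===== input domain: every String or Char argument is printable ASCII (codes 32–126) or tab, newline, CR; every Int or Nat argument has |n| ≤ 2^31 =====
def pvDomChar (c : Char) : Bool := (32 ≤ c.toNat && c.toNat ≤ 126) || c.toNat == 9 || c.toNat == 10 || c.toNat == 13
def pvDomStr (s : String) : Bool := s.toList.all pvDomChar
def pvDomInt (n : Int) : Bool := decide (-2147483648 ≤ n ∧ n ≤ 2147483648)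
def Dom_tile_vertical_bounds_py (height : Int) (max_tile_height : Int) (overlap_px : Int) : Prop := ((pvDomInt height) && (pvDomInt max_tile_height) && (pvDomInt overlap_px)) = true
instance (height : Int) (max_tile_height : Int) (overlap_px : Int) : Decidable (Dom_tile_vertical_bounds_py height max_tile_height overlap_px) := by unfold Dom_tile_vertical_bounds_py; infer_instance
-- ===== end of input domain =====

-- B replaces A's while-loop over tops with a closed-form tile count and a range comprehension (objective: alternative).

-- ===== PORT A =====
-- the while-loop of A; fuel only makes the recursion structural (inside Pre_ the loop
-- runs at most height steps, so fuel height.toNat + 1 is never exhausted)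
def tileLoopA (fuel : Nat) (height m o top : Int) : List (Int × Int) :=
  match fuel with
  | 0 => []
  | fuel + 1 =>
    if top < height then
      let bottom := min (top + m) height
      if height ≤ bottom then [(top, bottom)]
      else (top, bottom) :: tileLoopA fuel height m o (bottom - o)
    else []

def tile_vertical_bounds_py (height : Int) (max_tile_height : Int) (overlap_px : Int) : List (Int × Int) :=
  if max_tile_height ≤ 0 then []          -- Python raises ValueError here; excluded by Pre_
  else if overlap_px < 0 then []          -- ValueError; excluded by Pre_
  else if max_tile_height ≤ overlap_px then []  -- ValueError; excluded by Pre_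
  else if height ≤ 0 then []
  else if height ≤ max_tile_height then [(0, height)]
  else tileLoopA (height.toNat + 1) height max_tile_height overlap_px 0

-- ===== PORT B =====
def tile_vertical_bounds_py_alt (height : Int) (max_tile_height : Int) (overlap_px : Int) : List (Int × Int) :=
  if max_tile_height ≤ 0 then []          -- Python raises ValueError here; excluded by Pre_
  else if overlap_px < 0 then []          -- ValueError; excluded by Pre_
  else if max_tile_height ≤ overlap_px then []  -- ValueError; excluded by Pre_
  else if height ≤ 0 then []
  else if height ≤ max_tile_height then [(0, height)]
  else
    let stride := max_tile_height - overlap_px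
    let n := PySem.Int.floordiv (height - max_tile_height + stride - 1) stride + 1
    (PySem.List.pyRange 0 n 1).map
      (fun i => (i * stride, min (i * stride + max_tile_height) height))

-- ===== PRECONDITION & SPEC =====
-- Pre_ excludes exactly the inputs on which A raises ValueError (its three guard clauses).
def Pre_tile_vertical_bounds_py (height : Int) (max_tile_height : Int) (overlap_px : Int) : Prop :=
  0 < max_tile_height ∧ 0 ≤ overlap_px ∧ overlap_px < max_tile_height

instance (height : Int) (max_tile_height : Int) (overlap_px : Int) : Decidable (Pre_tile_vertical_bounds_py height max_tile_height overlap_px) := by unfold Pre_tile_vertical_bounds_py; infer_instance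

def pvWitness_tile_vertical_bounds_py : Int × Int × Int := (10, 4, 1)

def Spec_tile_vertical_bounds_py (height : Int) (max_tile_height : Int) (overlap_px : Int) (out : List (Int × Int)) : Prop := out = tile_vertical_bounds_py_alt height max_tile_height overlap_px
instance (height : Int) (max_tile_height : Int) (overlap_px : Int) (out : List (Int × Int)) : Decidable (Spec_tile_vertical_bounds_py height max_tile_height overlap_px out) := by unfold Spec_tile_vertical_bounds_py; infer_instance

-- ===== CLAIM (what is proved, stated in full; the proofs are below) =====
def Claim_equal_tile_vertical_bounds_py : Prop := ∀ (height : Int) (max_tile_height : Int) (overlap_px : Int), Dom_tile_vertical_bounds_py height max_tile_height overlap_px → Pre_tile_vertical_bounds_py height max_tile_height overlap_px → Spec_tile_vertical_bounds_py height max_tile_height overlap_px (tile_vertical_bounds_py height max_tile_height overlap_px)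

-- ===== LEMMAS AND PROOFS =====

-- The loop from top = i*s produces the tiles for indices i, i+1, …, i+k-1 = q,
-- where q is the last tile index: q*s + m ≥ h and (q-1)*s + m < h.
lemma tileLoopA_eq_range' (h m o s q : Int)
    (hs : s = m - o) (hspos : 0 < s) (ho : 0 ≤ o) (hh : m < h)
    (hq1 : h - m ≤ q * s) (hq2 : (q - 1) * s < h - m) :
    ∀ (k : Nat) (i fuel : Nat), (i : Int) + k = q + 1 → 1 ≤ k → k ≤ fuel →
      tileLoopA fuel h m o ((i : Int) * s) =
        (List.range' i k).map (fun j : Nat => ((j : Int) * s, min ((j : Int) * s + m) h)) := by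
  intro k
  induction k with
  | zero => intro _ _ _ hk; omega
  | succ k ih =>
    intro i fuel hik _ hfuel
    obtain ⟨fuel, rfl⟩ : ∃ f, fuel = f + 1 := ⟨fuel - 1, by omega⟩
    by_cases hk0 : k = 0
    · -- last tile: i = q, bottom clamps to h
      subst hk0
      have hiq : (i : Int) = q := by push_cast at hik ⊢; omega
      have htop : (i : Int) * s < h := by nlinarith
      have hbot : h ≤ (i : Int) * s + m := by nlinarith
      simp [tileLoopA, htop, hbot, List.range']
    · -- interior tile: bottom = i*s + m < h, next top = (i+1)*s
      have hiq : (i : Int) ≤ q - 1 := by push_cast at hik; omega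
      have hbot : (i : Int) * s + m < h := by nlinarith
      have htop : (i : Int) * s < h := by linarith
      have hnext : (i : Int) * s + m - o = ((i + 1 : Nat) : Int) * s := by
        push_cast; rw [hs]; ring
      rw [List.range']
      simp only [tileLoopA, if_pos htop]
      rw [min_eq_left (le_of_lt hbot), if_neg (by omega), hnext,
        ih (i + 1) fuel (by push_cast at hik ⊢; omega) (by omega) (by omega)]
      simp [min_eq_left (le_of_lt hbot)]

-- ===== VERDICT (by name: the statement is the Claim_ definition above) =====
theorem tile_vertical_bounds_py_spec : Claim_equal_tile_vertical_bounds_py := by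
  intro h m o _ ⟨hm, ho, hom⟩
  unfold Spec_tile_vertical_bounds_py tile_vertical_bounds_py tile_vertical_bounds_py_alt
  rw [if_neg (show ¬ m ≤ 0 by omega), if_neg (show ¬ o < 0 by omega),
      if_neg (show ¬ m ≤ o by omega), if_neg (show ¬ m ≤ 0 by omega),
      if_neg (show ¬ o < 0 by omega), if_neg (show ¬ m ≤ o by omega)]
  by_cases hh0 : h ≤ 0
  · rw [if_pos hh0, if_pos hh0]
  rw [if_neg hh0, if_neg hh0]
  by_cases hhm : h ≤ m
  · rw [if_pos hhm, if_pos hhm]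
  rw [if_neg hhm, if_neg hhm]
  push_neg at hh0 hhm
  set s := m - o with hs
  have hspos : 0 < s := by omega
  set q := PySem.Int.floordiv (h - m + s - 1) s with hq
  have hb1 : q * s ≤ h - m + s - 1 :=
    (PySem.Int.le_floordiv_iff_mul_le hspos).mp (le_refl q)
  have hb2 : h - m + s - 1 < (q + 1) * s :=
    (PySem.Int.floordiv_lt_iff_lt_mul hspos).mp (lt_add_one q)
  have hq1 : h - m ≤ q * s := by nlinarith
  have hq2 : (q - 1) * s < h - m := by nlinarith
  have hqpos : 1 ≤ q := by nlinarith
  have hqh : q + 1 ≤ h := by nlinarith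
  have hmain := tileLoopA_eq_range' h m o s q hs hspos ho hhm hq1 hq2
    (q + 1).toNat 0 (h.toNat + 1) (by omega) (by omega) (by omega)
  simp only [Nat.cast_zero, zero_mul] at hmain
  show _ = List.map (fun i => (i * s, min (i * s + m) h)) (PySem.List.pyRange 0 (q + 1))
  rw [PySem.List.pyRange_one, List.map_map]
  have : ((q + 1) - 0).toNat = (q + 1).toNat := by omega
  rw [this, List.range_eq_range']
  rw [hmain]
  simp
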